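-- pv_equiv track=rewrite | github.com/regix1/nvidia-docker-setup | src/nvidia/drivers.py | _get_cuda_support
-- ===== SOURCE A (Python) =====
-- def _get_cuda_support(driver_version):
--     """Get supported CUDA versions for a driver version"""
--     # Extract major version number
--     try:
--         major_version = int(driver_version.split('.')[0])
--     except:
--         return []
--
--     cuda_support = {
--         565: ["12.4.0", "12.3.2", "12.2.2", "12.1.1", "12.0.1", "11.8.0"],
--         560: ["12.3.2", "12.2.2", "12.1.1", "12.0.1", "11.8.0", "11.7.1"],
--         550: ["12.2.2", "12.1.1", "12.0.1", "11.8.0", "11.7.1", "11.6.2"],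
--         535: ["12.0.1", "11.8.0", "11.7.1", "11.6.2"],
--         525: ["11.8.0", "11.7.1", "11.6.2"],
--         470: ["11.7.1", "11.6.2", "11.5.2"]
--     }
--
--     # Find the best match
--     for version_threshold in sorted(cuda_support.keys(), reverse=True):
--         if major_version >= version_threshold:
--             return cuda_support[version_threshold]
--
--     return ["11.6.2"]  # Fallback for older drivers
-- ===== SOURCE B (Python) =====
-- def _get_cuda_support(driver_version):
--     """Get supported CUDA versions for a driver version"""
--     try:
--         major = int(driver_version.split('.')[0])
--     except:
--         return []
--
--     thresholds = [470, 525, 535, 550, 560, 565]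
--     tables = [
--         ["11.7.1", "11.6.2", "11.5.2"],
--         ["11.8.0", "11.7.1", "11.6.2"],
--         ["12.0.1", "11.8.0", "11.7.1", "11.6.2"],
--         ["12.2.2", "12.1.1", "12.0.1", "11.8.0", "11.7.1", "11.6.2"],
--         ["12.3.2", "12.2.2", "12.1.1", "12.0.1", "11.8.0", "11.7.1"],
--         ["12.4.0", "12.3.2", "12.2.2", "12.1.1", "12.0.1", "11.8.0"],
--     ]
--     # binary search: number of thresholds <= major (bisect_right)
--     lo, hi = 0, len(thresholds)
--     while lo < hi:
--         mid = (lo + hi) // 2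
--         if major < thresholds[mid]:
--             hi = mid
--         else:
--             lo = mid + 1
--     if lo == 0:
--         return ["11.6.2"]
--     return tables[lo - 1]
-- ===== Notes on version B (the rewrite author's own statement) =====
-- stated objective: alternative
-- what changed: Replaces A's dict plus descending linear scan of sorted keys with an ascending threshold list, a parallel table list, and a hand-written bisect_right binary search picking the highest threshold <= major.
import Mathlib
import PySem

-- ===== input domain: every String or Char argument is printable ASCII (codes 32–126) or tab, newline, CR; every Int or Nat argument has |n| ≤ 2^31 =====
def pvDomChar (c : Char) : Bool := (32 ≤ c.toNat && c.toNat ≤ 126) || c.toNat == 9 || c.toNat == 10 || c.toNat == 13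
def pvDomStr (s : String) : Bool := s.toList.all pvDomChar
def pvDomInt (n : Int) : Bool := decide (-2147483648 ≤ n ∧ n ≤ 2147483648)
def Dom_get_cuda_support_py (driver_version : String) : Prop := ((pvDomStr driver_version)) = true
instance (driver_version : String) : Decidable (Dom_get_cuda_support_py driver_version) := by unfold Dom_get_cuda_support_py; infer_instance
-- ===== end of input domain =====

-- B replaces A's descending linear scan over the dict keys by a binary search
-- (hand-written bisect_right) over an ascending threshold list (alternative structure, same cost at this size).


-- ===== PORT A =====
-- descending scan: first threshold ≤ major wins
def pyA_scan (d : PySem.Dict Int (List String)) (major : Int) : List Int → List String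
  | [] => ["11.6.2"]
  | t :: ts => if major ≥ t then d.getD t [] else pyA_scan d major ts

def get_cuda_support_py (driver_version : String) : List String :=
  match PySem.Int.ofStr? ((((PySem.Str.split? driver_version ".").getD []).headD "")) with
  | none => []
  | some major =>
    let cuda_support : PySem.Dict Int (List String) := PySem.Dict.ofList
      [ (565, ["12.4.0", "12.3.2", "12.2.2", "12.1.1", "12.0.1", "11.8.0"]),
        (560, ["12.3.2", "12.2.2", "12.1.1", "12.0.1", "11.8.0", "11.7.1"]),
        (550, ["12.2.2", "12.1.1", "12.0.1", "11.8.0", "11.7.1", "11.6.2"]),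
        (535, ["12.0.1", "11.8.0", "11.7.1", "11.6.2"]),
        (525, ["11.8.0", "11.7.1", "11.6.2"]),
        (470, ["11.7.1", "11.6.2", "11.5.2"]) ]
    pyA_scan cuda_support major (PySem.List.sorted cuda_support.keys (fun x => x) true)

-- ===== PORT B =====
-- while lo < hi: bisect_right step; fuel = len(thresholds) bounds the halving loop (totality only)
def pyB_bisect (thresholds : List Int) (major : Int) : Nat → Nat → Nat → Nat
  | 0, lo, _ => lo
  | fuel + 1, lo, hi =>
    if lo < hi then
      let mid := (lo + hi) / 2
      if major < thresholds.getD mid 0 then pyB_bisect thresholds major fuel lo mid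
      else pyB_bisect thresholds major fuel (mid + 1) hi
    else lo

def get_cuda_support_py_alt (driver_version : String) : List String :=
  match PySem.Int.ofStr? ((((PySem.Str.split? driver_version ".").getD []).headD "")) with
  | none => []
  | some major =>
    let thresholds : List Int := [470, 525, 535, 550, 560, 565]
    let tables : List (List String) :=
      [ ["11.7.1", "11.6.2", "11.5.2"],
        ["11.8.0", "11.7.1", "11.6.2"],
        ["12.0.1", "11.8.0", "11.7.1", "11.6.2"],
        ["12.2.2", "12.1.1", "12.0.1", "11.8.0", "11.7.1", "11.6.2"],
        ["12.3.2", "12.2.2", "12.1.1", "12.0.1", "11.8.0", "11.7.1"],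
        ["12.4.0", "12.3.2", "12.2.2", "12.1.1", "12.0.1", "11.8.0"] ]
    let lo := pyB_bisect thresholds major thresholds.length 0 thresholds.length
    if lo = 0 then ["11.6.2"] else tables.getD (lo - 1) []

-- ===== PRECONDITION & SPEC =====
def Spec_get_cuda_support_py (driver_version : String) (out : List String) : Prop := out = get_cuda_support_py_alt driver_version
instance (driver_version : String) (out : List String) : Decidable (Spec_get_cuda_support_py driver_version out) := by unfold Spec_get_cuda_support_py; infer_instance

-- ===== CLAIM (what is proved, stated in full; the proofs are below) =====
def Claim_equal_get_cuda_support_py : Prop := ∀ (driver_version : String), Dom_get_cuda_support_py driver_version → Spec_get_cuda_support_py driver_version (get_cuda_support_py driver_version)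

-- ===== LEMMAS AND PROOFS =====
lemma core_eq (m : Int) :
    pyA_scan (PySem.Dict.ofList
      [ (565, ["12.4.0", "12.3.2", "12.2.2", "12.1.1", "12.0.1", "11.8.0"]),
        (560, ["12.3.2", "12.2.2", "12.1.1", "12.0.1", "11.8.0", "11.7.1"]),
        (550, ["12.2.2", "12.1.1", "12.0.1", "11.8.0", "11.7.1", "11.6.2"]),
        (535, ["12.0.1", "11.8.0", "11.7.1", "11.6.2"]),
        (525, ["11.8.0", "11.7.1", "11.6.2"]),
        (470, ["11.7.1", "11.6.2", "11.5.2"]) ]) m ([565, 560, 550, 535, 525, 470] : List Int) =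
    (let lo := pyB_bisect [470, 525, 535, 550, 560, 565] m 6 0 6;
     if lo = 0 then ["11.6.2"] else
       ([ ["11.7.1", "11.6.2", "11.5.2"],
        ["11.8.0", "11.7.1", "11.6.2"],
        ["12.0.1", "11.8.0", "11.7.1", "11.6.2"],
        ["12.2.2", "12.1.1", "12.0.1", "11.8.0", "11.7.1", "11.6.2"],
        ["12.3.2", "12.2.2", "12.1.1", "12.0.1", "11.8.0", "11.7.1"],
        ["12.4.0", "12.3.2", "12.2.2", "12.1.1", "12.0.1", "11.8.0"] ] : List (List String)).getD (lo - 1) []) := by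
  simp only [pyA_scan, pyB_bisect]
  norm_num
  split_ifs <;> first | rfl | omega | simp_all

-- ===== VERDICT (by name: the statement is the Claim_ definition above) =====
theorem get_cuda_support_py_spec : Claim_equal_get_cuda_support_py := by
  intro dv _
  unfold Spec_get_cuda_support_py get_cuda_support_py get_cuda_support_py_alt
  cases h : PySem.Int.ofStr? (((PySem.Str.split? dv ".").getD []).headD "") with
  | none => rfl
  | some m =>
    dsimp only

    have hs : PySem.List.sorted
        (PySem.Dict.keys (PySem.Dict.ofList
          [ ((565:Int), ["12.4.0", "12.3.2", "12.2.2", "12.1.1", "12.0.1", "11.8.0"]),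
            (560, ["12.3.2", "12.2.2", "12.1.1", "12.0.1", "11.8.0", "11.7.1"]),
            (550, ["12.2.2", "12.1.1", "12.0.1", "11.8.0", "11.7.1", "11.6.2"]),
            (535, ["12.0.1", "11.8.0", "11.7.1", "11.6.2"]),
            (525, ["11.8.0", "11.7.1", "11.6.2"]),
            (470, ["11.7.1", "11.6.2", "11.5.2"]) ]))
        (fun x => x) true = ([565, 560, 550, 535, 525, 470] : List Int) := by decide
    rw [hs]
    exact core_eq m
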